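-- pv_equiv track=rewrite | github.com/REportPad/Algorithm | programmers/lv0/Throwing a ball.py | solution
-- ===== SOURCE A (Python) =====
-- def solution(numbers, k):
--     answer = 0
--     num_size = len(numbers)
--
--     i=1
--     cnt = 0
--     while cnt < k:
--         answer = (i)%num_size
--         i += 2
--         cnt += 1
--
--     return answer
-- ===== SOURCE B (Python) =====
-- def solution(numbers, k):
--     if k < 1:
--         return 0
--     return (2 * k - 1) % len(numbers)
-- ===== Notes on version B (the rewrite author's own statement) =====
-- stated objective: faster
-- what changed: Replaces the O(k) while-loop (which recomputes (2*cnt+1) % len(numbers) k times, keeping only the last value) with the closed form (2k-1) % len(numbers) for k >= 1, and 0 for k < 1.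
import Mathlib
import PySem

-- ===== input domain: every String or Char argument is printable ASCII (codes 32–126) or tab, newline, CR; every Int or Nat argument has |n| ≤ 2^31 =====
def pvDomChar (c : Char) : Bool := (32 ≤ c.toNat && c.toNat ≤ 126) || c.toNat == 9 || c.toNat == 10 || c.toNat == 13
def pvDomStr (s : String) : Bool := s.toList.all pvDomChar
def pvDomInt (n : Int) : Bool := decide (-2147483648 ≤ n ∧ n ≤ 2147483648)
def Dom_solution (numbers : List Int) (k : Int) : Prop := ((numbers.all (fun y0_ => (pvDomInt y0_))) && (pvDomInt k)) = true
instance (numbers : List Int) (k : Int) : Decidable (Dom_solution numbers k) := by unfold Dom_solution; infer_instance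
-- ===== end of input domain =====

-- B replaces A's O(k) while-loop with the closed form (2k-1) % len(numbers) (0 for k < 1).

-- ===== PORT A =====
-- A's while loop: state (answer, i); runs while cnt < k, i.e. max(k,0) = k.toNat times.
def solutionLoop (numSize : Int) (fuel : Nat) (answer i : Int) : Int :=
  match fuel with
  | 0 => answer
  | f + 1 => solutionLoop numSize f (PySem.Int.mod i numSize) (i + 2)

def solution (numbers : List Int) (k : Int) : Int :=
  solutionLoop (numbers.length : Int) k.toNat 0 1

-- ===== PORT B =====
def solution_alt (numbers : List Int) (k : Int) : Int :=
  if k < 1 then 0 else PySem.Int.mod (2 * k - 1) (numbers.length : Int)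

-- ===== PRECONDITION & SPEC =====
-- Pre_ excludes empty `numbers` with k >= 1, on which Python A raises ZeroDivisionError (B raises there too).
def Pre_solution (numbers : List Int) (k : Int) : Prop := numbers ≠ [] ∨ k < 1
instance (numbers : List Int) (k : Int) : Decidable (Pre_solution numbers k) := by unfold Pre_solution; infer_instance
def pvWitness_solution : List Int × Int := ([1, 2, 3], 5)

def Spec_solution (numbers : List Int) (k : Int) (out : Int) : Prop := out = solution_alt numbers k
instance (numbers : List Int) (k : Int) (out : Int) : Decidable (Spec_solution numbers k out) := by unfold Spec_solution; infer_instance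

-- ===== CLAIM (what is proved, stated in full; the proofs are below) =====
def Claim_equal_solution : Prop := ∀ (numbers : List Int) (k : Int), Dom_solution numbers k → Pre_solution numbers k → Spec_solution numbers k (solution numbers k)

-- ===== LEMMAS AND PROOFS =====
-- The loop's final value depends only on the last i taken mod numSize.
theorem solutionLoop_closed (numSize : Int) (f : Nat) :
    ∀ (a i : Int), solutionLoop numSize (f + 1) a i = PySem.Int.mod (i + 2 * f) numSize := by
  induction f with
  | zero => intro a i; simp [solutionLoop]
  | succ f ih =>
      intro a i
      show solutionLoop numSize (f + 1) (PySem.Int.mod i numSize) (i + 2) = _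
      rw [ih]
      congr 1
      push_cast
      ring

-- ===== VERDICT (by name: the statement is the Claim_ definition above) =====
theorem solution_spec : Claim_equal_solution := by
  intro numbers k _ _
  unfold Spec_solution solution solution_alt
  by_cases hk : k < 1
  · have : k.toNat = 0 := by omega
    simp [this, solutionLoop, hk]
  · have hpos : 0 < k := by omega
    obtain ⟨f, hf⟩ : ∃ f : Nat, k.toNat = f + 1 := ⟨k.toNat - 1, by omega⟩
    rw [hf, solutionLoop_closed]
    have : (1 : Int) + 2 * (f : Int) = 2 * k - 1 := by
      have : ((f : Int) + 1) = k := by omega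
      omega
    rw [this]
    simp [hk]
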